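-- pv_equiv track=rewrite | github.com/rag-lub/Tutoring | lab2.py | popular_names
-- ===== SOURCE A (Python) =====
-- def popular_names(nameLst):
--     resultsLst = []
--     occurances = 0
--     for name in nameLst:
--         if nameLst.count(name)>occurances:
--             occurances=nameLst.count(name)
--             resultsLst.clear()
--             resultsLst.append(name)
--         elif nameLst.count(name)==occurances and name not in resultsLst:
--             resultsLst.append(name)
--     return resultsLst
-- ===== SOURCE B (Python) =====
-- def popular_names(nameLst):
--     counts = {}
--     for name in nameLst:
--         counts[name] = counts.get(name, 0) + 1
--     max_count = max(counts.values(), default=0)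
--     return [name for name in counts if counts[name] == max_count]
-- ===== Notes on version B (the rewrite author's own statement) =====
-- stated objective: faster
-- what changed: Replaced A's quadratic loop (list.count called per element, with a running max and clear/append bookkeeping) by three phases: one counting pass into an insertion-ordered dict, a separate max over the counts, and one filter over the dict's keys.
import Mathlib
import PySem

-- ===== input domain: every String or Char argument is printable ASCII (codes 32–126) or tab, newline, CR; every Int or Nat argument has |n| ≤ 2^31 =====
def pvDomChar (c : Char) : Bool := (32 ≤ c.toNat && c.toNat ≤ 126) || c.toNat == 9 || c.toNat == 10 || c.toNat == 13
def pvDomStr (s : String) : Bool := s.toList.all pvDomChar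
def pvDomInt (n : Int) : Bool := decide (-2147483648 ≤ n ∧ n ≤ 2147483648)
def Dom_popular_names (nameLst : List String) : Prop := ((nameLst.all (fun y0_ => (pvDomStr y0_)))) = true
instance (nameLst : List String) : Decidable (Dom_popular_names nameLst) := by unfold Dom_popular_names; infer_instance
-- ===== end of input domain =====

-- B replaces A's quadratic running-max loop (list.count per element plus clear/append bookkeeping)
-- by three phases — count into an ordered dict, take the max count, filter the keys — objective: faster.

-- ===== PORT A =====
-- literal transliteration of A: one fold carrying (resultsLst, occurances),
-- calling nameLst.count(name) on the full list at every element.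
def popular_names (nameLst : List String) : List String :=
  (nameLst.foldl
    (fun (st : List String × Int) name =>
      if (PySem.List.count nameLst name : Int) > st.2 then
        ([name], (PySem.List.count nameLst name : Int))
      else if (PySem.List.count nameLst name : Int) = st.2 ∧ name ∉ st.1 then
        (st.1 ++ [name], st.2)
      else st)
    ([], 0)).1

-- ===== PORT B =====
-- literal transliteration of B: build counts dict, take max of its values (default 0),
-- filter the keys keeping insertion order.
def popular_names_alt (nameLst : List String) : List String :=
  let counts : PySem.Dict String Int := nameLst.foldl (fun d name => d.insert name (d.getD name 0 + 1)) PySem.Dict.empty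
  let maxCount := PySem.List.maxD counts.values (fun v => v) 0
  counts.keys.filter (fun name => counts.getD name 0 == maxCount)

-- ===== PRECONDITION & SPEC =====
def Spec_popular_names (nameLst : List String) (out : List String) : Prop := out = popular_names_alt nameLst
instance (nameLst : List String) (out : List String) : Decidable (Spec_popular_names nameLst out) := by unfold Spec_popular_names; infer_instance

-- ===== CLAIM (what is proved, stated in full; the proofs are below) =====
def Claim_equal_popular_names : Prop := ∀ (nameLst : List String), Dom_popular_names nameLst → Spec_popular_names nameLst (popular_names nameLst)

-- ===== LEMMAS AND PROOFS =====

-- running max of c over a prefix (A's `occurances`)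
def pvMx (c : String → Int) (p : List String) : Int :=
  p.foldl (fun acc x => max acc (c x)) 0

-- A's `resultsLst` after processing prefix p: first occurrences whose count equals the running max
def pvRes (c : String → Int) (p : List String) : List String :=
  (PySem.Set.ofList p).filter (fun x => decide (c x = pvMx c p))

lemma pv_foldl_max_mem (l : List Int) (a : Int) :
    l.foldl max a = a ∨ l.foldl max a ∈ l := by
  induction l generalizing a with
  | nil => exact Or.inl rfl
  | cons x t ih =>
    rw [List.foldl_cons]
    rcases ih (max a x) with h | h
    · rcases le_total a x with hax | hxa
      · exact Or.inr (by rw [h, max_eq_right hax]; exact List.mem_cons_self)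
      · exact Or.inl (by rw [h, max_eq_left hxa])
    · exact Or.inr (List.mem_cons_of_mem x h)

lemma pvMx_eq_foldl_map (c : String → Int) (p : List String) :
    pvMx c p = (p.map c).foldl max 0 := by
  simp [pvMx, List.foldl_map]

lemma le_pvMx (c : String → Int) (p : List String) {x : String} (hx : x ∈ p) :
    c x ≤ pvMx c p := by
  rw [pvMx_eq_foldl_map]
  exact (PySem.List.le_foldl_max _ _).2 (c x) (List.mem_map_of_mem hx)

lemma pvMx_append_singleton (c : String → Int) (p : List String) (n : String) :
    pvMx c (p ++ [n]) = max (pvMx c p) (c n) := by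
  simp [pvMx]

lemma pv_ofList_append_singleton (p : List String) (n : String) :
    PySem.Set.ofList (p ++ [n]) = (PySem.Set.ofList p).add n := by
  simp [List.foldl_append, PySem.Set.ofList]

-- one step of A's loop moves the canonical state of prefix p to that of p ++ [n]
lemma pv_step (c : String → Int) (p : List String) (n : String) :
    (if c n > pvMx c p then ([n], c n)
     else if c n = pvMx c p ∧ n ∉ pvRes c p then (pvRes c p ++ [n], pvMx c p)
     else (pvRes c p, pvMx c p))
    = (pvRes c (p ++ [n]), pvMx c (p ++ [n])) := by
  have hmem : n ∈ PySem.Set.ofList p ↔ n ∈ p := PySem.Set.mem_ofList p n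
  by_cases h1 : c n > pvMx c p
  · have hnp : n ∉ p := fun hm => absurd (le_pvMx c p hm) (not_le.2 h1)
    have hadd : PySem.Set.ofList (p ++ [n]) = PySem.Set.ofList p ++ [n] := by
      rw [pv_ofList_append_singleton, PySem.Set.add]
      simp [hmem.not.2 hnp]
    have hmx : pvMx c (p ++ [n]) = c n := by
      rw [pvMx_append_singleton]; exact max_eq_right (le_of_lt h1)
    have hres : pvRes c (p ++ [n]) = [n] := by
      unfold pvRes
      rw [hadd, hmx, List.filter_append]
      have : (PySem.Set.ofList p).filter (fun x => decide (c x = c n)) = [] := by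
        rw [List.filter_eq_nil_iff]
        intro x hx
        have hle : c x ≤ pvMx c p := le_pvMx c p ((PySem.Set.mem_ofList p x).mp hx)
        simp only [decide_eq_true_eq]
        omega
      simp [this]
    simp [h1, hres, hmx]
  · have hle : c n ≤ pvMx c p := not_lt.1 h1
    have hmx : pvMx c (p ++ [n]) = pvMx c p := by
      rw [pvMx_append_singleton]; exact max_eq_left hle
    by_cases h2 : c n = pvMx c p ∧ n ∉ pvRes c p
    · have hnp : n ∉ p := by
        intro hm
        exact h2.2 (List.mem_filter.2 ⟨hmem.mpr hm, by simp [h2.1]⟩)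
      have hadd : PySem.Set.ofList (p ++ [n]) = PySem.Set.ofList p ++ [n] := by
        rw [pv_ofList_append_singleton, PySem.Set.add]
        simp [hmem.not.2 hnp]
      have hres : pvRes c (p ++ [n]) = pvRes c p ++ [n] := by
        unfold pvRes
        rw [hadd, hmx, List.filter_append]
        simp [h2.1]
      simp [h2, hres, hmx]
    · have hres : pvRes c (p ++ [n]) = pvRes c p := by
        by_cases hnp : n ∈ p
        · have hadd : PySem.Set.ofList (p ++ [n]) = PySem.Set.ofList p := by
            rw [pv_ofList_append_singleton, PySem.Set.add]
            simp [hmem.mpr hnp]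
          unfold pvRes; rw [hadd, hmx]
        · have hadd : PySem.Set.ofList (p ++ [n]) = PySem.Set.ofList p ++ [n] := by
            rw [pv_ofList_append_singleton, PySem.Set.add]
            simp [hmem.not.2 hnp]
          have hcn : c n ≠ pvMx c p := by
            intro he
            exact h2 ⟨he, fun hr => hnp (hmem.mp (List.mem_filter.1 hr).1)⟩
          unfold pvRes
          rw [hadd, hmx, List.filter_append]
          simp [hcn]
      simp [h1, h2, hres, hmx]

-- the loop invariant, by induction along the remaining suffix
lemma pv_loop (c : String → Int) (l p : List String) :
    l.foldl
      (fun (st : List String × Int) name =>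
        if c name > st.2 then ([name], c name)
        else if c name = st.2 ∧ name ∉ st.1 then (st.1 ++ [name], st.2)
        else st)
      (pvRes c p, pvMx c p)
    = (pvRes c (p ++ l), pvMx c (p ++ l)) := by
  induction l generalizing p with
  | nil => simp
  | cons n t ih =>
    rw [List.foldl_cons]
    have hstep :
        (if c n > (pvRes c p, pvMx c p).2 then ([n], c n)
         else if c n = (pvRes c p, pvMx c p).2 ∧ n ∉ (pvRes c p, pvMx c p).1 then
           ((pvRes c p, pvMx c p).1 ++ [n], (pvRes c p, pvMx c p).2)
         else (pvRes c p, pvMx c p)) = (pvRes c (p ++ [n]), pvMx c (p ++ [n])) := pv_step c p n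
    rw [hstep, ih (p ++ [n])]
    simp

-- A computes: first occurrences with maximal count, relative to the running max of the whole list
lemma popular_names_eq (xs : List String) :
    popular_names xs
      = (PySem.Set.ofList xs).filter
          (fun x => decide ((List.count x xs : Int) = pvMx (fun y => (List.count y xs : Int)) xs)) := by
  have h := pv_loop (fun y => (PySem.List.count xs y : Int)) xs []
  simp only [List.nil_append] at h
  have h' : popular_names xs = pvRes (fun y => (PySem.List.count xs y : Int)) xs :=
    congrArg Prod.fst h
  rw [h']
  unfold pvRes
  simp only [PySem.List.count_eq]
  rfl

-- B computes: keys of the counter whose count equals the max of the counter's values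
lemma popular_names_alt_eq (xs : List String) :
    popular_names_alt xs
      = (PySem.Set.ofList xs).filter
          (fun n => ((List.count n xs : Int)
              == PySem.List.maxD ((PySem.Set.ofList xs).map (fun k => (List.count k xs : Int)))
                   (fun v => v) 0)) := by
  unfold popular_names_alt
  simp only [PySem.Dict.values]
  rw [PySem.Dict.foldl_insert_getD_add_one_eq_counter]
  simp [PySem.Dict.items_counter, PySem.Dict.keys_counter,
    PySem.Dict.getD_counter, List.map_map, Function.comp_def]

-- max of the counter's values = A's running max
lemma pv_max_eq (xs : List String) :
    PySem.List.maxD ((PySem.Set.ofList xs).map (fun k => (List.count k xs : Int))) (fun v => v) 0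
      = pvMx (fun y => (List.count y xs : Int)) xs := by
  set c : String → Int := fun y => (List.count y xs : Int) with hc
  cases hS : PySem.Set.ofList xs with
  | nil =>
    have hxs : xs = [] := by
      cases xs with
      | nil => rfl
      | cons a t =>
        exfalso
        have : a ∈ PySem.Set.ofList (a :: t) := (PySem.Set.mem_ofList _ _).2 (by simp)
        rw [hS] at this; exact (List.not_mem_nil).elim this
    subst hxs
    simp [PySem.List.maxD, PySem.List.max?, pvMx]
  | cons k0 ks =>
    rw [List.map_cons, PySem.List.maxD, PySem.List.max?_id_cons]
    set M := (ks.map c).foldl max (c k0) with hM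
    have hub : ∀ y ∈ (k0 :: ks).map c, y ≤ M := by
      intro y hy
      rcases List.mem_cons.1 hy with h | h
      · exact h ▸ (PySem.List.le_foldl_max (ks.map c) (c k0)).1
      · exact (PySem.List.le_foldl_max (ks.map c) (c k0)).2 y h
    have hSmem : ∀ {z : String}, z ∈ k0 :: ks → z ∈ xs := by
      intro z hz
      exact (PySem.Set.mem_ofList xs z).1 (hS ▸ hz)
    apply le_antisymm
    · -- M ≤ pvMx
      rcases pv_foldl_max_mem (ks.map c) (c k0) with h | h
      · have hk : k0 ∈ xs := hSmem (by simp)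
        rw [hM, h]
        exact le_pvMx c xs hk
      · rcases List.mem_map.1 h with ⟨z, hz, hzc⟩
        have hzx : z ∈ xs := hSmem (List.mem_cons_of_mem _ hz)
        rw [hM, ← hzc]
        exact le_pvMx c xs hzx
    · -- pvMx ≤ M
      rw [pvMx_eq_foldl_map]
      rcases pv_foldl_max_mem (xs.map c) 0 with h | h
      · rw [h]
        have h0 : (0 : Int) ≤ c k0 := by simp [hc]
        exact le_trans h0 (hub (c k0) (by simp))
      · rcases List.mem_map.1 h with ⟨z, hz, hzc⟩
        have hzS : z ∈ k0 :: ks := hS ▸ (PySem.Set.mem_ofList xs z).2 hz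
        rw [← hzc]
        exact hub (c z) (List.mem_map_of_mem hzS)

-- ===== VERDICT (by name: the statement is the Claim_ definition above) =====
theorem popular_names_spec : Claim_equal_popular_names := by
  intro xs _
  unfold Spec_popular_names
  rw [popular_names_eq, popular_names_alt_eq, pv_max_eq]
  apply List.filter_congr
  intro x _
  by_cases h : (List.count x xs : Int)
      = pvMx (fun y => (List.count y xs : Int)) xs <;> simp [h]
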